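-- pv_equiv track=rewrite | github.com/CesarChaMal/interview-patterns-24x | examples/python/bit_manipulation_examples.py | find_maximum_xor_with_element
-- ===== SOURCE A (Python) =====
-- def find_maximum_xor_with_element(nums, queries):
--     class TrieNode:
--         def __init__(self):
--             self.children = {}
--             self.min_val = float('inf')
--
--     root = TrieNode()
--
--     def insert(num):
--         node = root
--         node.min_val = min(node.min_val, num)
--         for i in range(31, -1, -1):
--             bit = (num >> i) & 1
--             if bit not in node.children:
--                 node.children[bit] = TrieNode()
--             node = node.children[bit]
--             node.min_val = min(node.min_val, num)
--
--     def query_max_xor(x, m):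
--         node = root
--         if node.min_val > m:
--             return -1
--
--         max_xor = 0
--         for i in range(31, -1, -1):
--             bit = (x >> i) & 1
--             toggled_bit = 1 - bit
--
--             if (toggled_bit in node.children and
--                 node.children[toggled_bit].min_val <= m):
--                 max_xor |= (1 << i)
--                 node = node.children[toggled_bit]
--             else:
--                 node = node.children[bit]
--
--         return max_xor
--
--     # Sort nums and queries by value for processing
--     sorted_nums = sorted(nums)
--     indexed_queries = sorted(enumerate(queries), key=lambda x: x[1][1])
--
--     result = [0] * len(queries)
--     num_idx = 0
--
--     for orig_idx, (xi, mi) in indexed_queries: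
--         # Insert all numbers <= mi
--         while num_idx < len(sorted_nums) and sorted_nums[num_idx] <= mi:
--             insert(sorted_nums[num_idx])
--             num_idx += 1
--
--         result[orig_idx] = query_max_xor(xi, mi)
--
--     return result
-- ===== SOURCE B (Python) =====
-- def find_maximum_xor_with_element(nums, queries):
--     MASK = (1 << 32) - 1
--     return [max(((x ^ n) & MASK for n in nums if n <= m), default=-1)
--             for x, m in queries]
-- ===== Notes on version B (the rewrite author's own statement) =====
-- stated objective: simpler
-- what changed: Replaces the offline algorithm (sort nums, sort queries by limit, incrementally insert into a bit trie with per-node minima, greedy MSB descent per query) by a direct two-line brute force: for each query take the maximum of (x ^ n) & 0xFFFFFFFF over the nums not exceeding m, with -1 as the default for an empty candidate set.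
import Mathlib
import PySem

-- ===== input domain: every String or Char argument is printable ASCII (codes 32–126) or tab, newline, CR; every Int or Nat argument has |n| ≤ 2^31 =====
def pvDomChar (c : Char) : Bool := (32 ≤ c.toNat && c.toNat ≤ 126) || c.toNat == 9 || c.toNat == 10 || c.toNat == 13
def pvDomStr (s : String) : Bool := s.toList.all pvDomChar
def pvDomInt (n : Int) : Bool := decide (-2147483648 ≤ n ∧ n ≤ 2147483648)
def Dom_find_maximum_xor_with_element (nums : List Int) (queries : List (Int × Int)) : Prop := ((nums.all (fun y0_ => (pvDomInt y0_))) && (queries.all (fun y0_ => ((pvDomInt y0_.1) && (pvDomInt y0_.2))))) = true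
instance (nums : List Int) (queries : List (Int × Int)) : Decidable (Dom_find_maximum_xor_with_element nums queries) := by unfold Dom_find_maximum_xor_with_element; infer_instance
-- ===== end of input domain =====

-- B replaces the offline machinery (sort nums, sort queries by limit, incremental
-- bit trie with per-node minima, greedy MSB descent) by a direct per-query brute
-- force: max of (x ^ n) & 0xFFFFFFFF over nums not exceeding m, default -1;
-- objective: simpler (B is not faster).

-- ===== PORT A =====
-- A's TrieNode: children dict {0,1} modelled by two child slots (nil = key absent),
-- min_val modelled by Option Int (none = float('inf'): inf only ever compared/min'ed).
inductive PvTrie where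
  | nil : PvTrie
  | node : Option Int → PvTrie → PvTrie → PvTrie
deriving DecidableEq, Repr

def PvTrie.minv : PvTrie → Option Int
  | .nil => none
  | .node o _ _ => o

def PvTrie.childAt : PvTrie → Int → PvTrie
  | .nil, _ => .nil
  | .node _ c0 c1, b => if b = 0 then c0 else c1

-- node.min_val = min(node.min_val, num); on nil this is "TrieNode() freshly created, then min-updated"
def PvTrie.setMin : PvTrie → Int → PvTrie
  | .nil, n => .node (some n) .nil .nil
  | .node none c0 c1, n => .node (some n) c0 c1
  | .node (some v) c0 c1, n => .node (some (min v n)) c0 c1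

-- (num >> i) & 1
def pvBitA (num : Int) (k : Nat) : Int := PySem.Int.band (num >>> k) 1

-- insert's 'for i in range(31, -1, -1)' as countdown recursion; k+1 means next bit index is k
def pvInsLoop (num : Int) : Nat → PvTrie → PvTrie
  | 0, t => t
  | k+1, t =>
      let bit := pvBitA num k
      let c := (t.childAt bit).setMin num
      if bit = 0 then PvTrie.node t.minv (pvInsLoop num k c) (t.childAt 1)
      else PvTrie.node t.minv (t.childAt 0) (pvInsLoop num k c)

def pvInsert (t : PvTrie) (num : Int) : PvTrie := pvInsLoop num 32 (t.setMin num)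

-- 'toggled_bit in node.children and node.children[toggled_bit].min_val <= m'
def pvMinLe : PvTrie → Int → Bool
  | .nil, _ => false
  | .node none _ _, _ => false
  | .node (some v) _ _, m => v ≤ m

def pvQLoop (x m : Int) : Nat → PvTrie → Int → Int
  | 0, _, acc => acc
  | k+1, t, acc =>
      let bit := pvBitA x k
      let tb := 1 - bit
      if pvMinLe (t.childAt tb) m then
        pvQLoop x m k (t.childAt tb) (PySem.Int.bor acc ((1:Int) <<< k))
      else pvQLoop x m k (t.childAt bit) acc

def pvQuery (x m : Int) (root : PvTrie) : Int :=
  match root.minv with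
  | none => -1
  | some v => if m < v then -1 else pvQLoop x m 32 root 0

-- 'while num_idx < len(sorted_nums) and sorted_nums[num_idx] <= mi' (fuel = slots left, always sufficient)
def pvFillA (sn : List Int) (mi : Int) : Nat → PvTrie → Nat → PvTrie × Nat
  | 0, t, idx => (t, idx)
  | f+1, t, idx =>
      if idx < sn.length ∧ sn.getD idx 0 ≤ mi then
        pvFillA sn mi f (pvInsert t (sn.getD idx 0)) (idx+1)
      else (t, idx)

def pvStepA (sn : List Int) (st : PvTrie × Nat × List Int) (p : Int × Int × Int) : PvTrie × Nat × List Int :=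
  let (root, idx, res) := st
  let (root', idx') := pvFillA sn p.2.2 (sn.length - idx) root idx
  (root', idx', PySem.List.pySetD res p.1 (pvQuery p.2.1 p.2.2 root'))

def find_maximum_xor_with_element (nums : List Int) (queries : List (Int × Int)) : List Int :=
  let sorted_nums := PySem.List.sorted nums (fun x => x) false
  let indexed_queries := PySem.List.sorted (PySem.List.enumerate queries) (fun p => p.2.2) false
  (indexed_queries.foldl (pvStepA sorted_nums) (PvTrie.nil, 0, List.replicate queries.length 0)).2.2

-- ===== PORT B =====
def find_maximum_xor_with_element_alt (nums : List Int) (queries : List (Int × Int)) : List Int :=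
  let MASK := (1:Int) <<< 32 - 1
  queries.map (fun q =>
    PySem.List.maxD ((nums.filter (fun n => decide (n ≤ q.2))).map
      (fun n => PySem.Int.band (PySem.Int.bxor q.1 n) MASK)) (fun v => v) (-1))

-- ===== PRECONDITION & SPEC =====
def Spec_find_maximum_xor_with_element (nums : List Int) (queries : List (Int × Int)) (out : List Int) : Prop := out = find_maximum_xor_with_element_alt nums queries
instance (nums : List Int) (queries : List (Int × Int)) (out : List Int) : Decidable (Spec_find_maximum_xor_with_element nums queries out) := by unfold Spec_find_maximum_xor_with_element; infer_instance

-- ===== CLAIM (what is proved, stated in full; the proofs are below) =====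
def Claim_equal_find_maximum_xor_with_element : Prop := ∀ (nums : List Int) (queries : List (Int × Int)), Dom_find_maximum_xor_with_element nums queries → Spec_find_maximum_xor_with_element nums queries (find_maximum_xor_with_element nums queries)

-- ===== LEMMAS AND PROOFS =====

-- B's per-query value, named for the proofs (definitionally the body of port B's lambda)
def pvAns (nums : List Int) (x m : Int) : Int :=
  PySem.List.maxD ((nums.filter (fun n => decide (n ≤ m))).map
    (fun n => PySem.Int.band (PySem.Int.bxor x n) ((1:Int) <<< 32 - 1))) (fun v => v) (-1)

-- ---- bit arithmetic: A's per-bit quantities vs B's (x ^ n) & MASK ----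

theorem pvBitA_emod (x : Int) (k : Nat) : pvBitA x k = (x / 2^k) % 2 := by
  rw [pvBitA, PySem.Int.band_one, PySem.Int.mod_eq_emod_of_pos (by norm_num),
    Int.shiftRight_eq_div_pow]
  norm_cast

theorem pvBitA_cases (x : Int) (k : Nat) : pvBitA x k = 0 ∨ pvBitA x k = 1 := by
  rw [pvBitA_emod]; omega

-- the low-k-bits XOR of x and n, bit by bit (the value A's greedy maximises)
def pvLx (x n : Int) : Nat → Int
  | 0 => 0
  | k+1 => (if pvBitA x k = pvBitA n k then 0 else 2^k) + pvLx x n k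

theorem pvLx_nonneg (x n : Int) : ∀ k, 0 ≤ pvLx x n k := by
  intro k
  induction k with
  | zero => simp [pvLx]
  | succ k ih => simp only [pvLx]; split_ifs <;> positivity

theorem pvLx_lt (x n : Int) : ∀ k, pvLx x n k < 2^k := by
  intro k
  induction k with
  | zero => simp [pvLx]
  | succ k ih =>
    have h2 : (2:Int)^(k+1) = 2^k + 2^k := by rw [pow_succ]; ring
    have hp : (0:Int) < 2^k := by positivity
    simp only [pvLx]; split_ifs <;> omega

theorem pvDivNegRep (m : Nat) : ((-(m:Int) - 1) / 2) = -((m/2 : Nat) : Int) - 1 := by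
  omega

theorem pvNatXorMod2 (p q : Nat) : (p ^^^ q) % 2 = (p % 2) ^^^ (q % 2) := by
  have h1 := Nat.testBit_xor p q 0
  simp [Nat.testBit_zero] at h1
  have hp := Nat.mod_two_eq_zero_or_one p
  have hq := Nat.mod_two_eq_zero_or_one q
  rcases hp with hp | hp <;> rcases hq with hq | hq <;> rw [hp, hq] <;>
    simp [hp, hq] at h1 ⊢ <;> omega

theorem pvCastDiv2 (p : Nat) : ((p:Int))/2 = ((p/2 : Nat) : Int) := by omega

theorem pvCastMod2 (p : Nat) : ((p:Int)) % 2 = ((p % 2 : Nat) : Int) := by omega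

theorem pvNegMod2 (m : Nat) : (-(m:Int) - 1) % 2 = 1 - ((m % 2 : Nat) : Int) := by omega

theorem pvBxor_nn (p q : Nat) : PySem.Int.bxor (p:Int) (q:Int) = ((p ^^^ q : Nat) : Int) := by
  simp [PySem.Int.bxor]

theorem pvBxor_npos (p m : Nat) :
    PySem.Int.bxor (p:Int) (-(m:Int) - 1) = -((p ^^^ m : Nat) : Int) - 1 := by
  have h1 : ¬ (0 ≤ -(m:Int) - 1) := by omega
  have h2 : (-(-(m:Int) - 1) - 1).toNat = m := by omega
  rw [PySem.Int.bxor, if_pos (Int.natCast_nonneg p), if_neg h1, h2, Int.toNat_natCast]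

theorem pvBxor_negn (m q : Nat) :
    PySem.Int.bxor (-(m:Int) - 1) (q:Int) = -((m ^^^ q : Nat) : Int) - 1 := by
  have h1 : ¬ (0 ≤ -(m:Int) - 1) := by omega
  have h2 : (-(-(m:Int) - 1) - 1).toNat = m := by omega
  rw [PySem.Int.bxor, if_neg h1, if_pos (Int.natCast_nonneg q), h2, Int.toNat_natCast]

theorem pvBxor_negneg (ma mb : Nat) :
    PySem.Int.bxor (-(ma:Int) - 1) (-(mb:Int) - 1) = ((ma ^^^ mb : Nat) : Int) := by
  have h1 : ¬ (0 ≤ -(ma:Int) - 1) := by omega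
  have h1' : ¬ (0 ≤ -(mb:Int) - 1) := by omega
  have h2 : (-(-(ma:Int) - 1) - 1).toNat = ma := by omega
  have h2' : (-(-(mb:Int) - 1) - 1).toNat = mb := by omega
  rw [PySem.Int.bxor, if_neg h1, if_neg h1', h2, h2']

theorem pvXorDiv2 (a b : Int) :
    PySem.Int.bxor a b / 2 = PySem.Int.bxor (a/2) (b/2) := by
  by_cases ha : 0 ≤ a <;> by_cases hb : 0 ≤ b
  · obtain ⟨p, rfl⟩ := Int.eq_ofNat_of_zero_le ha
    obtain ⟨q, rfl⟩ := Int.eq_ofNat_of_zero_le hb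
    rw [pvBxor_nn, pvCastDiv2, pvCastDiv2, pvCastDiv2, pvBxor_nn, Nat.xor_div_two]
  · obtain ⟨p, rfl⟩ := Int.eq_ofNat_of_zero_le ha
    obtain ⟨m, rfl⟩ : ∃ m : Nat, b = -(m:Int) - 1 := ⟨(-b - 1).toNat, by omega⟩
    rw [pvBxor_npos, pvCastDiv2, pvDivNegRep, pvDivNegRep, pvBxor_npos, Nat.xor_div_two]
  · obtain ⟨q, rfl⟩ := Int.eq_ofNat_of_zero_le hb
    obtain ⟨m, rfl⟩ : ∃ m : Nat, a = -(m:Int) - 1 := ⟨(-a - 1).toNat, by omega⟩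
    rw [pvBxor_negn, pvCastDiv2, pvDivNegRep, pvDivNegRep, pvBxor_negn, Nat.xor_div_two]
  · obtain ⟨ma, rfl⟩ : ∃ m : Nat, a = -(m:Int) - 1 := ⟨(-a - 1).toNat, by omega⟩
    obtain ⟨mb, rfl⟩ : ∃ m : Nat, b = -(m:Int) - 1 := ⟨(-b - 1).toNat, by omega⟩
    rw [pvBxor_negneg, pvCastDiv2, pvDivNegRep, pvDivNegRep, pvBxor_negneg, Nat.xor_div_two]

theorem pvXorMod2 (a b : Int) :
    (PySem.Int.bxor a b) % 2 = if a % 2 = b % 2 then 0 else 1 := by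
  by_cases ha : 0 ≤ a <;> by_cases hb : 0 ≤ b
  · obtain ⟨p, rfl⟩ := Int.eq_ofNat_of_zero_le ha
    obtain ⟨q, rfl⟩ := Int.eq_ofNat_of_zero_le hb
    rw [pvBxor_nn, pvCastMod2, pvCastMod2, pvCastMod2, pvNatXorMod2]
    rcases Nat.mod_two_eq_zero_or_one p with hp | hp <;>
      rcases Nat.mod_two_eq_zero_or_one q with hq | hq <;> rw [hp, hq] <;> norm_num
  · obtain ⟨p, rfl⟩ := Int.eq_ofNat_of_zero_le ha
    obtain ⟨m, rfl⟩ : ∃ m : Nat, b = -(m:Int) - 1 := ⟨(-b - 1).toNat, by omega⟩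
    rw [pvBxor_npos, pvNegMod2, pvCastMod2, pvNegMod2, pvNatXorMod2]
    rcases Nat.mod_two_eq_zero_or_one p with hp | hp <;>
      rcases Nat.mod_two_eq_zero_or_one m with hq | hq <;> rw [hp, hq] <;> norm_num
  · obtain ⟨q, rfl⟩ := Int.eq_ofNat_of_zero_le hb
    obtain ⟨m, rfl⟩ : ∃ m : Nat, a = -(m:Int) - 1 := ⟨(-a - 1).toNat, by omega⟩
    rw [pvBxor_negn, pvNegMod2, pvCastMod2, pvNegMod2, pvNatXorMod2]
    rcases Nat.mod_two_eq_zero_or_one m with hp | hp <;>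
      rcases Nat.mod_two_eq_zero_or_one q with hq | hq <;> rw [hp, hq] <;> norm_num
  · obtain ⟨ma, rfl⟩ : ∃ m : Nat, a = -(m:Int) - 1 := ⟨(-a - 1).toNat, by omega⟩
    obtain ⟨mb, rfl⟩ : ∃ m : Nat, b = -(m:Int) - 1 := ⟨(-b - 1).toNat, by omega⟩
    rw [pvBxor_negneg, pvCastMod2, pvNegMod2, pvNegMod2, pvNatXorMod2]
    rcases Nat.mod_two_eq_zero_or_one ma with hp | hp <;>
      rcases Nat.mod_two_eq_zero_or_one mb with hq | hq <;> rw [hp, hq] <;> norm_num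

theorem pvXorDivPow (a b : Int) : ∀ k : Nat,
    PySem.Int.bxor a b / 2^k = PySem.Int.bxor (a/2^k) (b/2^k) := by
  intro k
  induction k with
  | zero => simp
  | succ k ih =>
    have hsplit : ∀ c : Int, c / 2^(k+1) = c / 2^k / 2 := by
      intro c
      rw [pow_succ]
      exact (Int.ediv_ediv_of_nonneg (by positivity)).symm
    rw [hsplit, hsplit, hsplit, ih, pvXorDiv2]

theorem pvEmodSucc (a : Int) (k : Nat) :
    a % (2^(k+1)) = 2^k * ((a / 2^k) % 2) + a % (2^k) := by
  have hp : (0:Int) < 2^k := by positivity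
  have h1 := Int.ediv_add_emod a (2^k)
  have h2 := Int.ediv_add_emod (a / 2^k) 2
  have hr1 : 0 ≤ a % 2^k := Int.emod_nonneg a (by omega)
  have hr1' : a % 2^k < 2^k := Int.emod_lt_of_pos a hp
  have hr2 : (a/2^k) % 2 = 0 ∨ (a/2^k) % 2 = 1 := by omega
  have hrw : a = (2^k * ((a/2^k) % 2) + a % 2^k) + (2^(k+1)) * (a / 2^k / 2) := by
    linear_combination (-1 : Int) * h1 - 2^k * h2
  conv_lhs => rw [hrw]
  rw [Int.add_mul_emod_self_left]
  refine Int.emod_eq_of_lt ?_ ?_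
  · rcases hr2 with h | h <;> rw [h] <;> omega
  · have h2' : (2:Int)^(k+1) = 2^k + 2^k := by rw [pow_succ]; ring
    rcases hr2 with h | h <;> rw [h] <;> omega

theorem pvLx_emod (x n : Int) : ∀ k, pvLx x n k = (PySem.Int.bxor x n) % (2^k) := by
  intro k
  induction k with
  | zero => simp [pvLx]
  | succ k ih =>
    rw [pvEmodSucc, ← ih]
    have hb : (PySem.Int.bxor x n / 2^k) % 2 = if (x/2^k) % 2 = (n/2^k) % 2 then 0 else 1 := by
      rw [pvXorDivPow]; exact pvXorMod2 _ _
    simp only [pvLx, pvBitA_emod, hb]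
    split_ifs <;> ring

theorem pvBandMask (a : Int) :
    PySem.Int.band a ((1:Int) <<< 32 - 1) = a % 4294967296 := by
  have hmv : ((1:Int) <<< 32 - 1) = 4294967295 := by decide
  have h1 : (4294967295 : Int).toNat = 2^32 - 1 := by decide
  have hp : (2:Nat)^32 = 4294967296 := by norm_num
  rw [hmv]
  by_cases ha : 0 ≤ a
  · simp only [PySem.Int.band, if_pos ha, if_pos (show (0:Int) ≤ 4294967295 by norm_num)]
    rw [h1, Nat.and_two_pow_sub_one_eq_mod]
    simp only [hp]
    omega
  · simp only [PySem.Int.band, if_neg ha, if_pos (show (0:Int) ≤ 4294967295 by norm_num)]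
    rw [h1, Nat.and_comm, Nat.and_two_pow_sub_one_eq_mod]
    simp only [hp]
    omega

theorem pvLx32 (x n : Int) :
    pvLx x n 32 = PySem.Int.band (PySem.Int.bxor x n) ((1:Int) <<< 32 - 1) := by
  rw [pvBandMask, pvLx_emod]
  norm_num

-- ---- running maximum of a nonempty list ----

def pvMaxL : List Int → Int
  | [] => 0
  | h :: t => t.foldl max h

theorem pvMaxL_mem (l : List Int) (h : l ≠ []) : pvMaxL l ∈ l := by
  match l with
  | h₀ :: t =>
    rcases PySem.List.foldl_max_mem t h₀ with h | h <;> simp [pvMaxL, h]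

theorem pvMaxL_ub (l : List Int) : ∀ a ∈ l, a ≤ pvMaxL l := by
  intro a ha
  match l with
  | h₀ :: t =>
    rcases List.mem_cons.mp ha with rfl | ha
    · exact (PySem.List.le_foldl_max t a).1
    · exact (PySem.List.le_foldl_max t h₀).2 a ha

theorem pvMaxL_eq_of (l : List Int) (v : Int) (hm : v ∈ l) (hub : ∀ a ∈ l, a ≤ v) :
    pvMaxL l = v :=
  le_antisymm (hub _ (pvMaxL_mem l (List.ne_nil_of_mem hm))) (pvMaxL_ub l v hm)

theorem pvMaxL_perm (l1 l2 : List Int) (hp : l1.Perm l2) (h1 : l1 ≠ []) :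
    pvMaxL l1 = pvMaxL l2 := by
  have h2 : l2 ≠ [] := by
    intro hc; rw [hc] at hp; exact h1 (List.Perm.eq_nil hp)
  exact pvMaxL_eq_of l1 (pvMaxL l2) (hp.mem_iff.mpr (pvMaxL_mem l2 h2))
    (fun a ha => pvMaxL_ub l2 a (hp.mem_iff.mp ha))

theorem pvMaxD_eq (l : List Int) (h : l ≠ []) :
    PySem.List.maxD l (fun v => v) (-1) = pvMaxL l := by
  match l with
  | h₀ :: t =>
    show (PySem.List.max? (h₀ :: t) (fun v => v)).getD (-1) = _
    rw [PySem.List.max?_id_cons]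
    rfl

-- ---- minima of lists, canonical tries (A-side model) ----

def pvMinL (L : List Int) : Int :=
  match L with
  | [] => 0
  | h :: t => t.foldl min h

def pvBld : Nat → List Int → PvTrie
  | _, [] => .nil
  | 0, L => .node (some (pvMinL L)) .nil .nil
  | k+1, L => .node (some (pvMinL L))
      (pvBld k (L.filter (fun n => decide (pvBitA n k = 0))))
      (pvBld k (L.filter (fun n => decide (pvBitA n k = 1))))

theorem pvFoldMin_mem : ∀ (t : List Int) (h : Int), t.foldl min h ∈ h :: t := by
  intro t
  induction t with
  | nil => simp
  | cons x xs ih =>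
    intro h
    have := ih (min h x)
    rcases List.mem_cons.mp this with hc | hc
    · rcases min_cases h x with ⟨he, _⟩ | ⟨he, _⟩ <;> simp_all [List.foldl_cons]
    · simp_all [List.foldl_cons]

theorem pvMinL_mem (L : List Int) (h : L ≠ []) : pvMinL L ∈ L := by
  match L with
  | h₀ :: t => exact pvFoldMin_mem t h₀

theorem pvMinL_le (L : List Int) (m : Int) (h : L ≠ []) (hm : ∀ n ∈ L, n ≤ m) :
    pvMinL L ≤ m := hm _ (pvMinL_mem L h)

theorem pvMinL_append (L : List Int) (n : Int) :
    pvMinL (L ++ [n]) = if L = [] then n else min (pvMinL L) n := by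
  match L with
  | [] => simp [pvMinL]
  | h :: t => simp [pvMinL, List.foldl_append]

theorem pvSetMin_bld (k : Nat) (L : List Int) (n : Int) :
    (pvBld k L).setMin n = PvTrie.node (some (pvMinL (L ++ [n])))
      (match k with
       | 0 => PvTrie.nil
       | k+1 => pvBld k (L.filter (fun x => decide (pvBitA x k = 0))))
      (match k with
       | 0 => PvTrie.nil
       | k+1 => pvBld k (L.filter (fun x => decide (pvBitA x k = 1)))) := by
  match L, k with
  | [], 0 => simp [pvBld, PvTrie.setMin, pvMinL]
  | [], k+1 => simp [pvBld, PvTrie.setMin, pvMinL]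
  | h :: t, 0 =>
    have hmin : pvMinL (h :: (t ++ [n])) = min (pvMinL (h :: t)) n := by
      simpa using pvMinL_append (h :: t) n
    simp [pvBld, PvTrie.setMin, hmin]
  | h :: t, k+1 =>
    have hmin : pvMinL (h :: (t ++ [n])) = min (pvMinL (h :: t)) n := by
      simpa using pvMinL_append (h :: t) n
    simp [pvBld, PvTrie.setMin, hmin]

theorem pvBld_cons_ne (k : Nat) (L : List Int) (h : L ≠ []) :
    pvBld k L = PvTrie.node (some (pvMinL L))
      (match k with
       | 0 => PvTrie.nil
       | k+1 => pvBld k (L.filter (fun x => decide (pvBitA x k = 0))))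
      (match k with
       | 0 => PvTrie.nil
       | k+1 => pvBld k (L.filter (fun x => decide (pvBitA x k = 1)))) := by
  match L, k with
  | h₀ :: t, 0 => simp [pvBld]
  | h₀ :: t, k+1 => simp [pvBld]

theorem pvIns_bld (num : Int) : ∀ (k : Nat) (L : List Int),
    pvInsLoop num k ((pvBld k L).setMin num) = pvBld k (L ++ [num]) := by
  intro k
  induction k with
  | zero =>
    intro L
    rw [pvSetMin_bld]
    rw [pvBld_cons_ne 0 (L ++ [num]) (by simp)]
    simp [pvInsLoop]
  | succ k ih =>
    intro L
    rw [pvSetMin_bld]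
    rw [pvBld_cons_ne (k+1) (L ++ [num]) (by simp)]
    have hb := pvBitA_cases num k
    simp only [pvInsLoop]
    rcases hb with hb | hb
    · rw [if_pos hb]
      simp only [PvTrie.childAt, PvTrie.minv, if_pos rfl]
      have h0 : (L ++ [num]).filter (fun x => decide (pvBitA x k = 0)) =
          L.filter (fun x => decide (pvBitA x k = 0)) ++ [num] := by
        simp [List.filter_append, hb]
      have h1 : (L ++ [num]).filter (fun x => decide (pvBitA x k = 1)) =
          L.filter (fun x => decide (pvBitA x k = 1)) := by
        simp [List.filter_append, hb]
      rw [h0, h1, ← ih]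
      simp
      simp [hb]
    · rw [if_neg (by omega)]
      have hne1 : ¬ ((1:Int) = 0) := by norm_num
      simp only [PvTrie.childAt, PvTrie.minv, if_neg hne1, if_pos rfl, hb]
      have h0 : (L ++ [num]).filter (fun x => decide (pvBitA x k = 0)) =
          L.filter (fun x => decide (pvBitA x k = 0)) := by
        simp [List.filter_append, hb]
      have h1 : (L ++ [num]).filter (fun x => decide (pvBitA x k = 1)) =
          L.filter (fun x => decide (pvBitA x k = 1)) ++ [num] := by
        simp [List.filter_append, hb]
      rw [h0, h1, ← ih]
      simp

theorem pvMinLe_bld (k : Nat) (M : List Int) (m : Int) (hm : ∀ n ∈ M, n ≤ m) :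
    (pvMinLe (pvBld k M) m = true) ↔ M ≠ [] := by
  match M with
  | [] =>
    have hnil : pvBld k [] = PvTrie.nil := by cases k <;> simp [pvBld]
    simp [hnil, pvMinLe]
  | h :: t =>
    rw [pvBld_cons_ne k (h :: t) (by simp)]
    cases k <;> simp [pvMinLe] <;> exact pvMinL_le (h :: t) m (by simp) hm

theorem pvChildAt_bld (k : Nat) (M : List Int) (hne : M ≠ []) (c : Int) (hc : c = 0 ∨ c = 1) :
    (pvBld (k+1) M).childAt c = pvBld k (M.filter (fun n => decide (pvBitA n k = c))) := by
  rw [pvBld_cons_ne _ _ hne]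
  rcases hc with rfl | rfl
  · simp [PvTrie.childAt]
  · simp [PvTrie.childAt]

-- disjoint bitwise or is addition
theorem pvLor2m1 (m : Nat) : (2*m) ||| 1 = 2*m+1 := by
  have := Nat.lor_bit false m true 0
  simp [Nat.bit] at this
  simpa using this

theorem pvLorPow (m k : Nat) : (m * 2^(k+1)) ||| 2^k = m * 2^(k+1) + 2^k := by
  have h1 : m * 2^(k+1) = (2*m) <<< k := by rw [Nat.shiftLeft_eq]; ring
  have h2 : (2:Nat)^k = 1 <<< k := by rw [Nat.shiftLeft_eq]; ring
  rw [h1, h2, ← Nat.shiftLeft_or_distrib, pvLor2m1]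
  simp [Nat.shiftLeft_eq]; ring

theorem pvBor_pow (acc : Int) (k : Nat) (h0 : 0 ≤ acc) (hd : (2:Int)^(k+1) ∣ acc) :
    PySem.Int.bor acc ((1:Int) <<< k) = acc + 2^k := by
  obtain ⟨d, rfl⟩ := hd
  have hp : (0:Int) < 2^(k+1) := by positivity
  have hdn : 0 ≤ d := nonneg_of_mul_nonneg_left (by simpa [mul_comm] using h0) hp
  have hsh : ((1:Int) <<< k) = 2^k := by rw [Int.shiftLeft_eq]; ring
  rw [PySem.Int.bor_of_nonneg h0 (by rw [hsh]; positivity)]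
  have ht1 : ((2:Int)^(k+1) * d).toNat = d.toNat * 2^(k+1) := by
    rw [mul_comm]
    rw [Int.toNat_mul hdn (by positivity)]
    congr 1
  have ht2 : ((1:Int) <<< k).toNat = 2^k := by
    rw [hsh]
    have : ((2:Int)^k) = ((2^k : Nat) : Int) := by push_cast; ring
    rw [this, Int.toNat_natCast]
  rw [ht1, ht2, pvLorPow]
  push_cast [Int.toNat_of_nonneg hdn]
  ring

-- ---- the greedy descent computes the maximum ----

theorem pvQLoop_max (x m : Int) : ∀ (k : Nat) (L' : List Int) (acc : Int),
    L' ≠ [] → (∀ n ∈ L', n ≤ m) → 0 ≤ acc → (2:Int)^k ∣ acc →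
    pvQLoop x m k (pvBld k L') acc = acc + pvMaxL (L'.map (fun n => pvLx x n k)) := by
  intro k
  induction k with
  | zero =>
    intro L' acc hne _ _ _
    have hz : pvMaxL (L'.map (fun n => pvLx x n 0)) = 0 := by
      apply pvMaxL_eq_of
      · match L' with
        | h :: t => simp [pvLx]
      · intro a ha
        obtain ⟨n, _, rfl⟩ := List.mem_map.mp ha
        simp [pvLx]
    simp [pvQLoop, hz]
  | succ k ih =>
    intro L' acc hne hm hacc0 haccd
    have hbx := pvBitA_cases x k
    set Ltb := L'.filter (fun n => decide (pvBitA n k = 1 - pvBitA x k)) with hLtb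
    set Lsm := L'.filter (fun n => decide (pvBitA n k = pvBitA x k)) with hLsm
    have hmtb : ∀ n ∈ Ltb, n ≤ m := fun n hn => hm n (List.mem_filter.mp hn).1
    have hchtb : (pvBld (k+1) L').childAt (1 - pvBitA x k) = pvBld k Ltb :=
      pvChildAt_bld k L' hne (1 - pvBitA x k) (by omega)
    have hchsm : (pvBld (k+1) L').childAt (pvBitA x k) = pvBld k Lsm :=
      pvChildAt_bld k L' hne (pvBitA x k) hbx
    have hminle := pvMinLe_bld k Ltb m hmtb
    have hMnn : Ltb ≠ [] → 0 ≤ pvMaxL (Ltb.map (fun n => pvLx x n k)) := by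
      intro hne'
      match hLL : Ltb with
      | n₀ :: t =>
        have h0 : pvLx x n₀ k ∈ (n₀ :: t).map (fun n => pvLx x n k) := by simp
        calc (0:Int) ≤ pvLx x n₀ k := pvLx_nonneg x n₀ k
        _ ≤ _ := pvMaxL_ub _ _ h0
    simp only [pvQLoop]
    by_cases hc : Ltb ≠ []
    · rw [hchtb, if_pos (hminle.mpr hc)]
      rw [pvBor_pow acc k hacc0 haccd]
      have hsh : ((1:Int) <<< k) = 2^k := by rw [Int.shiftLeft_eq]; ring
      rw [ih Ltb (acc + 2^k) hc hmtb (by positivity)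
        (dvd_add (dvd_trans ⟨2, by ring⟩ haccd) dvd_rfl)]
      have hsplit : pvMaxL (L'.map (fun n => pvLx x n (k+1)))
          = 2^k + pvMaxL (Ltb.map (fun n => pvLx x n k)) := by
        apply pvMaxL_eq_of
        · obtain ⟨a, ha, hav⟩ := List.mem_map.mp
            (pvMaxL_mem (Ltb.map (fun n => pvLx x n k)) (by simpa using hc))
          have haL : a ∈ L' := (List.mem_filter.mp ha).1
          have hab : pvBitA a k = 1 - pvBitA x k := by
            have := (List.mem_filter.mp ha).2; simpa using this
          refine List.mem_map.mpr ⟨a, haL, ?_⟩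
          simp only [pvLx]
          rw [if_neg (by omega), hav]
        · intro v hv
          obtain ⟨n, hn, rfl⟩ := List.mem_map.mp hv
          have hbn := pvBitA_cases n k
          simp only [pvLx]
          by_cases hsame : pvBitA x k = pvBitA n k
          · rw [if_pos hsame]
            have := pvLx_lt x n k
            have := hMnn hc
            omega
          · rw [if_neg hsame]
            have hntb : n ∈ Ltb := List.mem_filter.mpr ⟨hn, by simp; omega⟩
            have : pvLx x n k ≤ pvMaxL (Ltb.map (fun n => pvLx x n k)) :=
              pvMaxL_ub _ _ (List.mem_map.mpr ⟨n, hntb, rfl⟩)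
            omega
      rw [hsplit]
      ring
    · push_neg at hc
      rw [hchtb, if_neg (by rw [hminle]; simpa using hc)]
      have hall : ∀ n ∈ L', pvBitA n k = pvBitA x k := by
        intro n hn
        have hbn := pvBitA_cases n k
        by_contra hne'
        have : n ∈ Ltb := List.mem_filter.mpr ⟨hn, by simp; omega⟩
        rw [hc] at this
        simp at this
      have hLsmL : Lsm = L' := by
        rw [hLsm]
        exact List.filter_eq_self.mpr (fun a ha => by simp [hall a ha])
      rw [hchsm, hLsmL, ih L' acc hne hm hacc0 (dvd_trans ⟨2, by ring⟩ haccd)]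
      have hmap : L'.map (fun n => pvLx x n (k+1)) = L'.map (fun n => pvLx x n k) := by
        apply List.map_congr_left
        intro n hn
        simp only [pvLx]
        rw [if_pos (hall n hn).symm]
        ring
      rw [hmap]

theorem pvQuery_max (x m : Int) (L : List Int) (hne : L ≠ []) (hm : ∀ n ∈ L, n ≤ m) :
    pvQuery x m (pvBld 32 L) = pvMaxL (L.map (fun n => pvLx x n 32)) := by
  have hminv : (pvBld 32 L).minv = some (pvMinL L) := by
    rw [pvBld_cons_ne 32 L hne]; rfl
  unfold pvQuery
  rw [hminv]
  simp only []
  rw [if_neg (by push_neg; exact pvMinL_le L m hne hm)]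
  simpa using pvQLoop_max x m 32 L 0 hne hm le_rfl ⟨0, by ring⟩

-- A's trie answer over any list permutation-equal to nums' eligible elements is B's answer
theorem pvAns_of_perm (nums : List Int) (x m : Int) (L : List Int)
    (hp : L.Perm (nums.filter (fun n => decide (n ≤ m)))) (hm : ∀ n ∈ L, n ≤ m) :
    pvQuery x m (pvBld 32 L) = pvAns nums x m := by
  by_cases hne : L = []
  · subst hne
    have hfil : nums.filter (fun n => decide (n ≤ m)) = [] := (List.Perm.eq_nil hp.symm)
    unfold pvAns
    rw [hfil]
    rfl
  · rw [pvQuery_max x m L hne hm]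
    have hfne : nums.filter (fun n => decide (n ≤ m)) ≠ [] := by
      intro hc; rw [hc] at hp; exact hne (List.Perm.eq_nil hp)
    unfold pvAns
    rw [pvMaxD_eq _ (by simpa using hfne)]
    have hmapeq : (nums.filter (fun n => decide (n ≤ m))).map
        (fun n => PySem.Int.band (PySem.Int.bxor x n) ((1:Int) <<< 32 - 1))
        = (nums.filter (fun n => decide (n ≤ m))).map (fun n => pvLx x n 32) := by
      apply List.map_congr_left
      intro n _
      exact (pvLx32 x n).symm
    rw [hmapeq]
    exact pvMaxL_perm _ _ (hp.map _) (by simpa using hne)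

-- ---- the incremental insertion: fill loop, take = filter on the sorted list ----

theorem pvFillA_spec (sn : List Int) (mi : Int) : ∀ (f : Nat) (idx : Nat),
    idx ≤ sn.length → sn.length ≤ idx + f → (∀ n ∈ sn.take idx, n ≤ mi) →
    ∃ idx' : Nat, idx ≤ idx' ∧ idx' ≤ sn.length ∧ (∀ n ∈ sn.take idx', n ≤ mi) ∧
      (idx' = sn.length ∨ ¬ (sn.getD idx' 0 ≤ mi)) ∧
      pvFillA sn mi f (pvBld 32 (sn.take idx)) idx = (pvBld 32 (sn.take idx'), idx') := by
  intro f
  induction f with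
  | zero =>
    intro idx h1 h2 h3
    exact ⟨idx, le_rfl, h1, h3, Or.inl (by omega), rfl⟩
  | succ f ih =>
    intro idx h1 h2 h3
    by_cases hcond : idx < sn.length ∧ sn.getD idx 0 ≤ mi
    · have hlt := hcond.1
      have htake : sn.take (idx+1) = sn.take idx ++ [sn.getD idx 0] := by
        rw [List.take_succ]
        congr 1
        simp [List.getElem?_eq_getElem hlt]
      obtain ⟨idx', ha, hb', hc, hstop, hA⟩ := ih (idx+1) (by omega) (by omega) (by
        intro n hn
        rw [htake] at hn
        rcases List.mem_append.mp hn with h | h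
        · exact h3 n h
        · simp at h; subst h; exact hcond.2)
      refine ⟨idx', by omega, hb', hc, hstop, ?_⟩
      show pvFillA sn mi (f+1) (pvBld 32 (sn.take idx)) idx = _
      simp only [pvFillA]
      rw [if_pos hcond]
      have hins : pvInsert (pvBld 32 (sn.take idx)) (sn.getD idx 0) = pvBld 32 (sn.take (idx+1)) := by
        unfold pvInsert
        rw [pvIns_bld, ← htake]
      rw [hins]
      exact hA
    · refine ⟨idx, le_rfl, h1, h3, ?_, ?_⟩
      · by_cases hl : idx < sn.length
        · right; intro hle; exact hcond ⟨hl, hle⟩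
        · left; omega
      · simp only [pvFillA]; rw [if_neg hcond]

theorem pvTake_eq_filter (nums : List Int) (mi : Int) (idx' : Nat)
    (hle : idx' ≤ (PySem.List.sorted nums (fun x => x) false).length)
    (hall : ∀ n ∈ (PySem.List.sorted nums (fun x => x) false).take idx', n ≤ mi)
    (hstop : idx' = (PySem.List.sorted nums (fun x => x) false).length ∨
      ¬ ((PySem.List.sorted nums (fun x => x) false).getD idx' 0 ≤ mi)) :
    (PySem.List.sorted nums (fun x => x) false).filter (fun n => decide (n ≤ mi))
      = (PySem.List.sorted nums (fun x => x) false).take idx' := by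
  set sn := PySem.List.sorted nums (fun x => x) false with hsn
  conv_lhs => rw [← List.take_append_drop idx' sn]
  rw [List.filter_append]
  have h1 : (sn.take idx').filter (fun n => decide (n ≤ mi)) = sn.take idx' :=
    List.filter_eq_self.mpr (fun a ha => by simp [hall a ha])
  have h2 : (sn.drop idx').filter (fun n => decide (n ≤ mi)) = [] := by
    rw [List.filter_eq_nil_iff]
    intro a ha
    obtain ⟨j, hj, hja⟩ := List.getElem_of_mem ha
    rcases hstop with hstop | hstop
    · rw [List.length_drop, hstop] at hj; omega
    · have hidx : idx' < sn.length := by rw [List.length_drop] at hj; omega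
      have hjlen : idx' + j < sn.length := by rw [List.length_drop] at hj; omega
      have hdrop : (sn.drop idx')[j] = sn[idx' + j]'hjlen := by
        rw [List.getElem_drop]
      have hgd : sn.getD idx' 0 = sn[idx']'hidx := List.getD_eq_getElem sn 0 hidx
      have hmono : sn[idx']'hidx ≤ sn[idx' + j]'hjlen := by
        have := PySem.List.sorted_id_getElem_mono (xs := nums)
          (p := idx') (q := idx' + j) (by omega) (by rw [← hsn]; exact hjlen)
        simpa [← hsn] using this
      have hamem : mi < a := by
        rw [← hja, hdrop]
        omega
      simp only [decide_eq_true_eq]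
      omega
  rw [h1, h2, List.append_nil]

-- result-list bookkeeping for one processed query
theorem pvRes_step (res B : List Int) (jn : Nat) (v : Int) (rest : List (Int × Int × Int))
    (h4 : res.length = B.length) (hjlt : jn < res.length)
    (hBj : B[jn]? = some v)
    (h7 : ∀ kn : Nat, kn < res.length →
      ((((kn : Int)) ∉ ((jn : Int)) :: rest.map (·.1)) → res[kn]? = B[kn]?)) :
    ∀ kn : Nat, kn < (res.set jn v).length →
      ((((kn : Int)) ∉ rest.map (·.1)) → (res.set jn v)[kn]? = B[kn]?) := by
  intro kn hkn hnot
  rw [List.length_set] at hkn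
  by_cases hk : kn = jn
  · subst hk
    rw [List.getElem?_set_self hkn, hBj]
  · rw [List.getElem?_set_ne (fun he => hk he.symm)]
    refine h7 kn hkn ?_
    intro hcon
    rcases List.mem_cons.mp hcon with he | he
    · exact hk (by exact_mod_cast he)
    · exact hnot he

-- the outer fold of A produces B's output list
theorem pvOuterEq (nums : List Int) (B : List Int) :
    ∀ (iq : List (Int × Int × Int)) (idx : Nat) (res : List Int),
    idx ≤ (PySem.List.sorted nums (fun x => x) false).length →
    (∀ n ∈ (PySem.List.sorted nums (fun x => x) false).take idx, ∀ q ∈ iq, n ≤ q.2.2) →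
    iq.Pairwise (fun a b => a.2.2 ≤ b.2.2) →
    (iq.map (·.1)).Nodup →
    res.length = B.length →
    (∀ p ∈ iq, ∃ jn : Nat, p.1 = (jn : Int) ∧ jn < res.length ∧
      B[jn]? = some (pvAns nums p.2.1 p.2.2)) →
    (∀ kn : Nat, kn < res.length → ((((kn : Int)) ∉ iq.map (·.1)) → res[kn]? = B[kn]?)) →
    (iq.foldl (pvStepA (PySem.List.sorted nums (fun x => x) false))
      (pvBld 32 ((PySem.List.sorted nums (fun x => x) false).take idx), idx, res)).2.2 = B := by
  intro iq
  induction iq with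
  | nil =>
    intro idx res h1 h2 h3 h4 h5 h6 h7
    simp only [List.foldl_nil]
    apply List.ext_getElem?_iff.mpr
    intro n
    by_cases hn : n < res.length
    · exact h7 n hn (by simp)
    · rw [List.getElem?_eq_none_iff.mpr (by omega), List.getElem?_eq_none_iff.mpr (by omega)]
  | cons p rest ih =>
    intro idx res h1 h2 h3 h4 h5 h6 h7
    obtain ⟨j, x, mi⟩ := p
    obtain ⟨jn, hj, hjlt, hBj⟩ := h6 ((j, x, mi)) (by simp)
    simp only at hj hBj
    subst hj
    set sn := PySem.List.sorted nums (fun x => x) false with hsn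
    obtain ⟨idx', hgei, hlei, hallm, hstop, hA⟩ := pvFillA_spec sn mi (sn.length - idx) idx h1
      (by omega) (fun n hn => h2 n hn ((jn : Int), x, mi) (by simp))
    simp only [List.foldl_cons, pvStepA]
    rw [hA]
    simp only [PySem.List.pySetD_natCast]
    have hperm : (sn.take idx').Perm (nums.filter (fun n => decide (n ≤ mi))) := by
      have h1' := pvTake_eq_filter nums mi idx' (by rw [← hsn]; exact hlei)
        (by rw [← hsn]; exact hallm) (by rw [← hsn]; exact hstop)
      rw [← hsn] at h1'
      rw [← h1']
      exact (PySem.List.sorted_perm nums (fun x => x) false).filter _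
    have hq : pvQuery x mi (pvBld 32 (sn.take idx')) = pvAns nums x mi :=
      pvAns_of_perm nums x mi (sn.take idx') hperm hallm
    rw [hq]
    have h2' : ∀ n ∈ sn.take idx', ∀ q ∈ rest, n ≤ q.2.2 := by
      intro n hn q hq'
      have hmq : mi ≤ q.2.2 := (List.pairwise_cons.mp h3).1 q hq'
      exact le_trans (hallm n hn) hmq
    have h7' : ∀ kn : Nat, kn < res.length →
        ((((kn : Int)) ∉ ((jn : Int)) :: rest.map (·.1)) → res[kn]? = B[kn]?) := by
      intro kn hkn
      have := h7 kn hkn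
      simpa using this
    exact ih idx' (res.set jn (pvAns nums x mi)) hlei h2'
      (List.pairwise_cons.mp h3).2
      (by simpa using (List.nodup_cons.mp (by simpa using h4)).2)
      (by simp [h5])
      (fun q hq' => by
        obtain ⟨kn, hk1, hk2, hk3⟩ := h6 q (by simp [hq'])
        exact ⟨kn, hk1, by simpa using hk2, hk3⟩)
      (pvRes_step res B jn (pvAns nums x mi) rest h5 hjlt (by rw [hBj]) h7')

-- ===== VERDICT (by name: the statement is the Claim_ definition above) =====
theorem find_maximum_xor_with_element_spec : Claim_equal_find_maximum_xor_with_element := by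
  intro nums queries _
  unfold Spec_find_maximum_xor_with_element
  simp only [find_maximum_xor_with_element]
  have hB : find_maximum_xor_with_element_alt nums queries
      = queries.map (fun q => pvAns nums q.1 q.2) := rfl
  rw [hB]
  set B := queries.map (fun q => pvAns nums q.1 q.2) with hBdef
  have hperm : (PySem.List.sorted (PySem.List.enumerate queries) (fun p => p.2.2) false).Perm
      (PySem.List.enumerate queries) := PySem.List.sorted_perm _ _ _
  have hmapf : ((PySem.List.sorted (PySem.List.enumerate queries) (fun p => p.2.2) false).map (·.1)).Perm
      (PySem.List.pyRange 0 (queries.length) 1) := by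
    have := hperm.map (·.1)
    rwa [PySem.List.map_fst_enumerate, zero_add] at this
  have hmem_map : ∀ z : Int, z ∈ (PySem.List.sorted (PySem.List.enumerate queries) (fun p => p.2.2) false).map (·.1)
      ↔ (0 ≤ z ∧ z < queries.length) := by
    intro z
    rw [hmapf.mem_iff, PySem.List.mem_pyRange_one]
  have hmain := pvOuterEq nums B
    (PySem.List.sorted (PySem.List.enumerate queries) (fun p => p.2.2) false)
    0 (List.replicate queries.length 0)
    (Nat.zero_le _) (by simp) (PySem.List.sorted_pairwise _ _) 
    (hmapf.symm.nodup (PySem.List.nodup_pyRange_one _ _))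
    (by simp [hBdef])
    (by
      intro p hp
      rw [PySem.List.mem_sorted, PySem.List.mem_enumerate_iff] at hp
      obtain ⟨k, hk, rfl⟩ := hp
      refine ⟨k, by simp, by simpa using hk, ?_⟩
      rw [hBdef, List.getElem?_map, List.getElem?_eq_getElem hk]
      simp)
    (by
      intro kn hkn hnot
      rw [List.length_replicate] at hkn
      exact absurd ((hmem_map (kn : Int)).mpr ⟨by positivity, by exact_mod_cast hkn⟩) hnot)
  have hb0 : pvBld 32 ((PySem.List.sorted nums (fun x => x) false).take 0) = PvTrie.nil := by
    rw [List.take_zero]; rfl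
  rw [hb0] at hmain
  exact hmain
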